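-- pv_equiv track=rewrite | github.com/Augustin007/usefulpy | src/usefulpy/IDE/partitions.py | _partition_single_quote
-- ===== SOURCE A (Python) =====
-- def _partition_single_quote(scource):
--     inchar = ''
--     instr = False
--     eschar = False
--     runstr = ''
--     lscource = []
--     for char in scource:
--         if not instr:
--             if char in ('"', "'"):
--                 inchar = char
--                 instr = True
--                 if runstr:
--                     lscource.append(runstr)
--                 runstr = char
--                 continue
--             runstr += char
--             continue
--         runstr += char
--         if (char == inchar) and (not eschar):
--             inchar = ''
--             instr = False
--             eschar = False
--             lscource.append(runstr)
--             runstr = ''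
--             continue
--         eschar = (char == '\\')
--     if runstr:
--         lscource.append(runstr)
--     return tuple(lscource)
-- ===== SOURCE B (Python) =====
-- def _partition_single_quote(scource):
--     # Two-phase delimiter scanner over indices/slices instead of a per-char flag machine.
--     segs = []
--     i = 0
--     n = len(scource)
--     while i < n:
--         j = i
--         while j < n and scource[j] not in ('"', "'"):
--             j += 1
--         if j > i:
--             segs.append(scource[i:j])
--         if j == n:
--             break
--         q = scource[j]
--         k = j + 1
--         while k < n and not (scource[k] == q and scource[k - 1] != '\\'):
--             k += 1
--         if k < n:
--             segs.append(scource[j:k + 1])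
--             i = k + 1
--         else:
--             segs.append(scource[j:])
--             break
--     return tuple(segs)
-- ===== Notes on version B (the rewrite author's own statement) =====
-- stated objective: alternative
-- what changed: Replaced the per-character flag machine (instr/eschar/inchar state with an accumulating run string) by a two-phase delimiter scanner: skip forward to the next quote, slice out the plain run, then scan forward for the first unescaped matching quote and slice out the string segment.
import Mathlib
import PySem

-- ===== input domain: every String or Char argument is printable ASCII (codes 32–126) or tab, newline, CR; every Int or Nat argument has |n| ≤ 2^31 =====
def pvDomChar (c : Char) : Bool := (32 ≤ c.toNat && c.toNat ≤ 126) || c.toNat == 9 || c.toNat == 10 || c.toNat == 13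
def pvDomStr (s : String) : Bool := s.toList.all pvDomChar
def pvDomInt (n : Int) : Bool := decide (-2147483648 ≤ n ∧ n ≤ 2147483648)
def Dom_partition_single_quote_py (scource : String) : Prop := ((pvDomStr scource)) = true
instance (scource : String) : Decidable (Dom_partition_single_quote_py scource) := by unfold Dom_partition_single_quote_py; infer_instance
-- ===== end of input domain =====

-- B replaces A's per-char in-string/escape flag machine by a two-phase delimiter
-- scanner (skip to next quote, then scan for its unescaped closer); objective: alternative.

-- ===== PORT A =====
-- state: (inchar, instr, eschar, runstr, lscource); strings handled as List Char
def pvStepA (s : Option Char × Bool × Bool × List Char × List (List Char)) (char : Char) :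
    Option Char × Bool × Bool × List Char × List (List Char) :=
  let (inchar, instr, eschar, runstr, lscource) := s
  if !instr then
    if char == '"' || char == '\'' then
      (some char, true, eschar, [char],
        if runstr.isEmpty then lscource else lscource ++ [runstr])
    else
      (inchar, instr, eschar, runstr ++ [char], lscource)
  else
    let runstr := runstr ++ [char]
    if (some char == inchar) && !eschar then
      (none, false, false, [], lscource ++ [runstr])
    else
      (inchar, instr, char == '\\', runstr, lscource)

def partition_single_quote_py (scource : String) : List String :=
  let st := scource.toList.foldl pvStepA (none, false, false, [], [])
  let (_, _, _, runstr, lscource) := st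
  (if runstr.isEmpty then lscource else lscource ++ [runstr]).map String.mk

-- ===== PORT B =====
-- inner scan: from just after the opening quote, with `prev` the previous char,
-- collect chars up to and including the first closer (c == q and prev ≠ '\\');
-- returns (collected, remainder). Unterminated: collects everything, remainder [].
def pvScanStr (q prev : Char) : List Char → List Char × List Char
  | [] => ([], [])
  | c :: rest =>
    if c == q && prev != '\\' then ([c], rest)
    else
      let sr := pvScanStr q c rest
      (c :: sr.1, sr.2)

theorem pvScanStr_snd_le (q prev : Char) (cs : List Char) :
    (pvScanStr q prev cs).2.length ≤ cs.length := by
  induction cs generalizing prev with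
  | nil => simp [pvScanStr]
  | cons c rest ih =>
    simp only [pvScanStr]
    split
    · simp
    · simpa using Nat.le_succ_of_le (ih c)

def pvPartB (cs : List Char) : List (List Char) :=
  let pre := cs.takeWhile (fun c => !(c == '"' || c == '\''))
  let rest := cs.dropWhile (fun c => !(c == '"' || c == '\''))
  match h : rest with
  | [] => if pre.isEmpty then [] else [pre]
  | q :: tl =>
    let sr := pvScanStr q q tl
    (if pre.isEmpty then [] else [pre]) ++ ((q :: sr.1) :: pvPartB sr.2)
termination_by cs.length
decreasing_by
  have h1 : (pvScanStr q q tl).2.length ≤ tl.length := pvScanStr_snd_le q q tl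
  have h2 : rest.length ≤ cs.length := by
    simpa [rest] using List.length_dropWhile_le (p := fun c => !(c == '"' || c == '\'')) (l := cs)
  simp only [h] at h2
  simp at h2 ⊢
  omega

def partition_single_quote_py_alt (scource : String) : List String :=
  (pvPartB scource.toList).map String.mk

-- ===== PRECONDITION & SPEC =====
def Spec_partition_single_quote_py (scource : String) (out : List String) : Prop := out = partition_single_quote_py_alt scource
instance (scource : String) (out : List String) : Decidable (Spec_partition_single_quote_py scource out) := by unfold Spec_partition_single_quote_py; infer_instance

-- ===== CLAIM (what is proved, stated in full; the proofs are below) =====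
def Claim_equal_partition_single_quote_py : Prop := ∀ (scource : String), Dom_partition_single_quote_py scource → Spec_partition_single_quote_py scource (partition_single_quote_py scource)

-- ===== LEMMAS AND PROOFS =====

-- final flush of A's loop
def pvFlush (st : Option Char × Bool × Bool × List Char × List (List Char)) : List (List Char) :=
  let (_, _, _, runstr, lscource) := st
  if runstr.isEmpty then lscource else lscource ++ [runstr]

-- what B produces from a plain (non-string) position with pending plain text `runstr`
def pvPlainOut (runstr : List Char) (cs : List Char) : List (List Char) :=
  let pre := cs.takeWhile (fun c => !(c == '"' || c == '\''))
  let rest := cs.dropWhile (fun c => !(c == '"' || c == '\''))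
  match rest with
  | [] => if (runstr ++ pre).isEmpty then [] else [runstr ++ pre]
  | q :: tl =>
    let sr := pvScanStr q q tl
    (if (runstr ++ pre).isEmpty then [] else [runstr ++ pre]) ++ ((q :: sr.1) :: pvPartB sr.2)

theorem pvPlainOut_nil (cs : List Char) : pvPlainOut [] cs = pvPartB cs := by
  rw [pvPartB, pvPlainOut]
  simp only [List.nil_append]
  cases hd : List.dropWhile (fun c => !(c == '"' || c == '\'')) cs <;> simp [hd]

-- the joint loop invariant, by strong induction on the length of the remaining input
theorem pvMain (n : ℕ) : ∀ cs : List Char, cs.length ≤ n →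
    (∀ runstr ls, pvFlush (cs.foldl pvStepA (none, false, false, runstr, ls)) =
        ls ++ pvPlainOut runstr cs) ∧
    (∀ (q prev : Char) (run : List Char) ls, run ≠ [] → ¬ (q = '\\') →
      pvFlush (cs.foldl pvStepA (some q, true, prev == '\\', run, ls)) =
        ls ++ (run ++ (pvScanStr q prev cs).1) :: pvPartB (pvScanStr q prev cs).2) := by
  induction n with
  | zero =>
    intro cs hcs
    have : cs = [] := List.eq_nil_of_length_eq_zero (Nat.le_zero.mp hcs)
    subst this
    constructor
    · intro runstr ls
      simp [pvFlush, pvPlainOut, List.takeWhile, List.dropWhile]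
      split <;> simp_all
    · intro q prev run ls hrun _
      simp [pvFlush, pvScanStr, pvPartB, List.takeWhile, List.dropWhile, hrun]
  | succ n ih =>
    intro cs hcs
    match cs with
    | [] => exact (ih [] (by simp))
    | c :: cs' =>
      have hcs' : cs'.length ≤ n := by simpa using Nat.lt_succ_iff.mp (by simpa using hcs)
      constructor
      · intro runstr ls
        by_cases hq : (c == '"' || c == '\'') = true
        · -- enter a string
          have hqne : ¬ (c = '\\') := by
            rcases Bool.or_eq_true _ _ |>.mp hq with h | h <;>
              simp_all
          have hstep : pvStepA (none, false, false, runstr, ls) c =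
              (some c, true, false, [c],
                if runstr.isEmpty then ls else ls ++ [runstr]) := by
            simp [pvStepA, hq]
          have hesc : (('«' : Char) == '\\') = false := by decide
          have hfalse : (false : Bool) = ('«' == '\\') := by decide
          have h2 := (ih cs' hcs').2 c '«' [c] (if runstr.isEmpty then ls else ls ++ [runstr])
            (by simp) hqne
          rw [List.foldl_cons, hstep]
          have : pvFlush (List.foldl pvStepA
              (some c, true, false, [c], if runstr.isEmpty then ls else ls ++ [runstr]) cs') =
              (if runstr.isEmpty then ls else ls ++ [runstr]) ++
                ([c] ++ (pvScanStr c '«' cs').1) :: pvPartB (pvScanStr c '«' cs').2 := by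
            rw [hfalse]; exact h2
          rw [this]
          -- RHS: pvPlainOut with head a quote
          have htw : (c :: cs').takeWhile (fun c => !(c == '"' || c == '\'')) = [] := by
            simp [List.takeWhile, hq]
          have hdw : (c :: cs').dropWhile (fun c => !(c == '"' || c == '\'')) = c :: cs' := by
            simp [List.dropWhile, hq]
          have hscan : pvScanStr c '«' cs' = pvScanStr c c cs' := by
            cases cs' with
            | nil => rfl
            | cons d ds =>
              simp only [pvScanStr]
              have : ('«' != '\\') = true := by decide
              have hc : (c != '\\') = true := by simp [hqne]
              rw [this, hc]
          simp only [pvPlainOut, htw, hdw, hscan]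
          by_cases hr : runstr = [] <;> simp [hr]
        · -- plain char
          have hstep : pvStepA (none, false, false, runstr, ls) c =
              (none, false, false, runstr ++ [c], ls) := by
            simp [pvStepA, hq]
          rw [List.foldl_cons, hstep]
          rw [(ih cs' hcs').1 (runstr ++ [c]) ls]
          have htw : (c :: cs').takeWhile (fun c => !(c == '"' || c == '\'')) =
              c :: cs'.takeWhile (fun c => !(c == '"' || c == '\'')) := by
            simp [List.takeWhile, hq]
          have hdw : (c :: cs').dropWhile (fun c => !(c == '"' || c == '\'')) =
              cs'.dropWhile (fun c => !(c == '"' || c == '\'')) := by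
            simp [List.dropWhile, hq]
          simp only [pvPlainOut, htw, hdw, List.append_assoc, List.cons_append, List.nil_append]
      · -- in-string case
        intro q prev run ls hrun hqne
        by_cases hclose : (c == q && prev != '\\') = true
        · have hc : (c = q) ∧ ¬ (prev = '\\') := by
            constructor
            · exact beq_iff_eq.mp (Bool.and_eq_true _ _ |>.mp hclose).1
            · have := (Bool.and_eq_true _ _ |>.mp hclose).2
              simpa using this
          have hstep : pvStepA (some q, true, prev == '\\', run, ls) c =
              (none, false, false, [], ls ++ [run ++ [c]]) := by
            simp [pvStepA, hc.1, hc.2]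
          rw [List.foldl_cons, hstep]
          rw [(ih cs' hcs').1 [] (ls ++ [run ++ [c]])]
          simp only [pvScanStr, hclose, if_pos, pvPlainOut_nil, List.append_assoc,
            List.cons_append, List.nil_append]
        · have hclosef : (c == q && prev != '\\') = false := by
            exact Bool.not_eq_true _ |>.mp hclose
          have hcc : (some c == some q && !(prev == '\\')) = false := by
            by_cases h1 : c = q
            · have : (prev != '\\') = false := by
                by_cases h2 : prev = '\\'
                · simp [h2]
                · exfalso; apply hclose; simp [h1, h2]
              simp only [bne, Bool.not_eq_false'] at this
              simp [this]
            · simp [h1]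
          have hstep : pvStepA (some q, true, prev == '\\', run, ls) c =
              (some q, true, c == '\\', run ++ [c], ls) := by
            simp only [pvStepA]
            simp
            intro h1
            by_contra h2
            exact hclose (by simp [h1, h2])
          rw [List.foldl_cons, hstep]
          have h2 := (ih cs' hcs').2 q c (run ++ [c]) ls (by simp) hqne
          rw [h2]
          simp [pvScanStr, hclosef]

-- ===== VERDICT (by name: the statement is the Claim_ definition above) =====
theorem partition_single_quote_py_spec : Claim_equal_partition_single_quote_py := by
  intro scource _
  unfold Spec_partition_single_quote_py partition_single_quote_py partition_single_quote_py_alt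
  have h := (pvMain scource.toList.length scource.toList (le_refl _)).1 [] []
  rw [pvPlainOut_nil] at h
  simp only [List.nil_append] at h
  simp only [pvFlush] at h
  rw [← h]
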